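-- pv_equiv track=rewrite | github.com/pypi-data/pypi-mirror-398 | packages/agent-heaven/agent_heaven-0.9.2-py3-none-any.whl/ahvn/utils/basic/parser_utils.py | _resolve_positional_args
-- ===== SOURCE A (Python) =====
-- from typing import Literal, Optional, List, Dict
--
-- def _resolve_positional_args(tool_args: List[str], positional_args: List, keyword_args: Dict):
--     final_args = dict()
--     positional_args = positional_args.copy()
--     for idx, param in enumerate(tool_args):
--         if param in keyword_args:
--             final_args[param] = keyword_args[param]
--             continue
--         if not len(positional_args):
--             raise ValueError("Not enough positional arguments provided.")
--         final_args[param] = positional_args.pop(0)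
--     return final_args
-- ===== SOURCE B (Python) =====
-- from typing import List, Dict
--
--
-- def _resolve_positional_args(tool_args: List[str], positional_args: List, keyword_args: Dict):
--     needed = [p for p in tool_args if p not in keyword_args]
--     if len(needed) > len(positional_args):
--         raise ValueError("Not enough positional arguments provided.")
--     pos_map = dict(zip(needed, positional_args))
--     final_args = dict()
--     for param in tool_args:
--         final_args[param] = keyword_args[param] if param in keyword_args else pos_map[param]
--     return final_args
-- ===== Notes on version B (the rewrite author's own statement) =====
-- stated objective: faster
-- what changed: Replaces the interleaved loop that pops positionals (list.pop(0), linear each time) while building the result with an index-build-then-assign shape: compute the list of parameters not covered by keywords, check its length up front, build a positional map with dict(zip(...)), then fill the result in one assignment pass.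
import Mathlib
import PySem

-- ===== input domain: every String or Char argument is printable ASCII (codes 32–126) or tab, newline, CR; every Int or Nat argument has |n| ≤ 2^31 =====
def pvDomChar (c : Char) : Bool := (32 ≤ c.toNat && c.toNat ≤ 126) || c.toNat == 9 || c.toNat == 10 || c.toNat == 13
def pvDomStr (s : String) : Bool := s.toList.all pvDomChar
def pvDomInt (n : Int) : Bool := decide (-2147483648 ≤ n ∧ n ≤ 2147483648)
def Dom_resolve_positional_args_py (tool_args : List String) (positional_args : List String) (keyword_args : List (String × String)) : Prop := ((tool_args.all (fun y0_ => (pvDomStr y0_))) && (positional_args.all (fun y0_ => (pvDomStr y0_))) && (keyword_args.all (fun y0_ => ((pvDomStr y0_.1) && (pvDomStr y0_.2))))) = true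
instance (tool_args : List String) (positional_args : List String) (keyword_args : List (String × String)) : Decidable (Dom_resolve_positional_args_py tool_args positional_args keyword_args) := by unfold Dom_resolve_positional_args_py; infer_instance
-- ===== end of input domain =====

-- B replaces A's interleaved pop-loop by an index-build-then-assign shape, removing the linear list.pop(0) from the loop (measured faster).

-- ===== PORT A =====
-- dict lookup on the keyword_args association list (first match, per the dict convention)
def pvKwGet? (kw : List (String × String)) (k : String) : Option String :=
  (kw.find? (fun p => p.1 == k)).map (·.2)

-- A's loop; `none` is the `raise ValueError` path (excluded by Pre_)
def pvGoA (kw : List (String × String)) : List String → List String → PySem.Dict String String → Option (PySem.Dict String String)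
  | [], _, acc => some acc
  | p :: rest, pos, acc =>
    match pvKwGet? kw p with
    | some v => pvGoA kw rest pos (acc.insert p v)
    | none =>
      match pos with
      | [] => none
      | x :: ps => pvGoA kw rest ps (acc.insert p x)

def resolve_positional_args_py (tool_args : List String) (positional_args : List String) (keyword_args : List (String × String)) : List (String × String) :=
  ((pvGoA keyword_args tool_args positional_args PySem.Dict.empty).getD PySem.Dict.empty).items

-- ===== PORT B =====
def resolve_positional_args_py_alt (tool_args : List String) (positional_args : List String) (keyword_args : List (String × String)) : List (String × String) :=
  let needed := tool_args.filter (fun p => (pvKwGet? keyword_args p).isNone)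
  if needed.length > positional_args.length then []   -- B's raise (excluded by Pre_)
  else
    let posMap := PySem.Dict.ofList (needed.zip positional_args)
    (tool_args.foldl (fun d p =>
        d.insert p (match pvKwGet? keyword_args p with
                    | some v => v
                    | none => posMap.getD p "")) PySem.Dict.empty).items
    -- `posMap.getD p ""` ports `pos_map[param]`; under Pre_ the key is always present

-- ===== PRECONDITION & SPEC =====
-- Pre_ excludes exactly the inputs on which A raises ValueError: when the number of tool
-- parameters not covered by keyword_args (with multiplicity) exceeds len(positional_args).
def Pre_resolve_positional_args_py (tool_args : List String) (positional_args : List String) (keyword_args : List (String × String)) : Prop :=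
  tool_args.countP (fun p => (pvKwGet? keyword_args p).isNone) ≤ positional_args.length
instance (tool_args : List String) (positional_args : List String) (keyword_args : List (String × String)) : Decidable (Pre_resolve_positional_args_py tool_args positional_args keyword_args) := by unfold Pre_resolve_positional_args_py; infer_instance

def pvWitness_resolve_positional_args_py : List String × List String × (List (String × String)) :=
  (["a", "b", "a"], ["1", "2"], [("b", "kw")])

def Spec_resolve_positional_args_py (tool_args : List String) (positional_args : List String) (keyword_args : List (String × String)) (out : List (String × String)) : Prop := out = resolve_positional_args_py_alt tool_args positional_args keyword_args
instance (tool_args : List String) (positional_args : List String) (keyword_args : List (String × String)) (out : List (String × String)) : Decidable (Spec_resolve_positional_args_py tool_args positional_args keyword_args out) := by unfold Spec_resolve_positional_args_py; infer_instance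

-- ===== CLAIM (what is proved, stated in full; the proofs are below) =====
def Claim_equal_resolve_positional_args_py : Prop := ∀ (tool_args : List String) (positional_args : List String) (keyword_args : List (String × String)), Dom_resolve_positional_args_py tool_args positional_args keyword_args → Pre_resolve_positional_args_py tool_args positional_args keyword_args → Spec_resolve_positional_args_py tool_args positional_args keyword_args (resolve_positional_args_py tool_args positional_args keyword_args)

-- ===== LEMMAS AND PROOFS =====

-- the value the key k ends up with after inserting the pairs of l left to right (last pair wins)
def pvLastVal (l : List (String × String)) (k : String) : Option String :=
  l.foldl (fun o q => if q.1 == k then some q.2 else o) none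

theorem pvLastVal_foldl (l : List (String × String)) (o : Option String) (k : String) :
    l.foldl (fun o q => if q.1 == k then some q.2 else o) o = (pvLastVal l k).or o := by
  induction l generalizing o with
  | nil => simp [pvLastVal]
  | cons q t ih =>
    simp only [pvLastVal, List.foldl_cons] at *
    rw [ih, ih (if (q.1 == k) = true then some q.2 else none)]
    cases h : (q.1 == k) <;> cases hl : t.foldl (fun o q => if q.1 == k then some q.2 else o) none <;>
      simp [Option.or]

theorem pvLastVal_cons (q : String × String) (t : List (String × String)) (k : String) :
    pvLastVal (q :: t) k = (pvLastVal t k).or (if q.1 == k then some q.2 else none) := by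
  simp only [pvLastVal, List.foldl_cons]
  exact pvLastVal_foldl t _ k

theorem pvLastVal_eq_none_iff (l : List (String × String)) (k : String) :
    pvLastVal l k = none ↔ k ∉ l.map Prod.fst := by
  induction l with
  | nil => simp [pvLastVal]
  | cons q t ih =>
    rw [pvLastVal_cons]
    cases h : (q.1 == k) <;> cases hl : pvLastVal t k <;>
      simp_all [Option.or, eq_comm (a := k)]

theorem pvGet?_insert_or (d : PySem.Dict String String) (a v k : String) :
    (d.insert a v).get? k = (if a == k then some v else none).or (d.get? k) := by
  rw [PySem.Dict.get?_insert]
  by_cases h : k = a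
  · subst h; simp [Option.or]
  · simp [h, Ne.symm h, Option.or, beq_iff_eq]

theorem pvGet?_foldl (l : List (String × String)) (d : PySem.Dict String String) (k : String) :
    (l.foldl (fun acc p => acc.insert p.1 p.2) d).get? k = (pvLastVal l k).or (d.get? k) := by
  induction l generalizing d with
  | nil => simp [pvLastVal]
  | cons q t ih =>
    rw [List.foldl_cons, ih, pvLastVal_cons, Option.or_assoc, pvGet?_insert_or]

theorem pvGet?_ofList (l : List (String × String)) (k : String) :
    (PySem.Dict.ofList l).get? k = pvLastVal l k := by
  have := pvGet?_foldl l PySem.Dict.empty k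
  simpa [PySem.Dict.ofList, PySem.Dict.update, PySem.Dict.get?_empty] using this

-- two insert-folds give the same dict when the key sequences agree and, per key, the final value agrees
theorem pvFoldl_ins_eq (l1 l2 : List (String × String)) (d1 d2 : PySem.Dict String String)
    (hfst : l1.map Prod.fst = l2.map Prod.fst)
    (hkeys : d1.keys = d2.keys) (hnd : d1.keys.Nodup)
    (hval : ∀ k, (pvLastVal l1 k).or (d1.get? k) = (pvLastVal l2 k).or (d2.get? k)) :
    l1.foldl (fun acc p => acc.insert p.1 p.2) d1 = l2.foldl (fun acc p => acc.insert p.1 p.2) d2 := by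
  induction l1 generalizing l2 d1 d2 with
  | nil =>
    cases l2 with
    | cons q2 t2 => simp at hfst
    | nil =>
      simp only [List.foldl_nil]
      apply PySem.Dict.ext
      have hnd2 : d2.keys.Nodup := hkeys ▸ hnd
      rw [PySem.Dict.items_eq_map_keys d1 hnd "", PySem.Dict.items_eq_map_keys d2 hnd2 "", hkeys]
      apply List.map_congr_left
      intro a _
      have := hval a
      simp only [pvLastVal, List.foldl_nil, Option.or] at this
      rw [PySem.Dict.getD_eq_get?_getD, PySem.Dict.getD_eq_get?_getD, this]
  | cons q1 t1 ih =>
    cases l2 with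
    | nil => simp at hfst
    | cons q2 t2 =>
      simp only [List.map_cons, List.cons.injEq] at hfst
      obtain ⟨hq, ht⟩ := hfst
      simp only [List.foldl_cons]
      rw [← hq]
      apply ih t2 (d1.insert q1.1 q1.2) (d2.insert q1.1 q2.2) ht
      · by_cases hc : d1.contains q1.1 = true
        · have hc2 : d2.contains q1.1 = true := by
            rw [PySem.Dict.contains_iff_mem_keys] at hc ⊢
            rwa [← hkeys]
          rw [PySem.Dict.keys_insert_of_contains _ _ hc, PySem.Dict.keys_insert_of_contains _ _ hc2, hkeys]
        · have hc2 : ¬ d2.contains q1.1 = true := by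
            rw [PySem.Dict.contains_iff_mem_keys, ← hkeys, ← PySem.Dict.contains_iff_mem_keys]
            exact hc
          rw [PySem.Dict.keys_insert_of_not_contains _ _ (by simpa using hc),
              PySem.Dict.keys_insert_of_not_contains _ _ (by simpa using hc2), hkeys]
      · exact PySem.Dict.nodup_keys_insert _ _ _ hnd
      · intro k
        have hv := hval k
        rw [pvLastVal_cons, pvLastVal_cons, Option.or_assoc, Option.or_assoc, ← hq] at hv
        rw [pvGet?_insert_or, pvGet?_insert_or]
        exact hv

-- the pairs (key, value) that A's loop inserts, in order
def pvPairsA (ka : List (String × String)) : List String → List String → List (String × String)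
  | [], _ => []
  | p :: rest, pos =>
    match pvKwGet? ka p with
    | some v => (p, v) :: pvPairsA ka rest pos
    | none =>
      match pos with
      | [] => []
      | x :: ps => (p, x) :: pvPairsA ka rest ps

theorem pvGoA_eq (ka : List (String × String)) (ta : List String) :
    ∀ (pos : List String) (acc : PySem.Dict String String),
      ta.countP (fun p => (pvKwGet? ka p).isNone) ≤ pos.length →
      pvGoA ka ta pos acc = some ((pvPairsA ka ta pos).foldl (fun acc p => acc.insert p.1 p.2) acc) := by
  induction ta with
  | nil => intro pos acc _; simp [pvGoA, pvPairsA]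
  | cons p rest ih =>
    intro pos acc h
    rw [List.countP_cons] at h
    cases hk : pvKwGet? ka p with
    | some v =>
      simp only [pvGoA, pvPairsA, hk, List.foldl_cons]
      exact ih pos _ (by simp [hk] at h; omega)
    | none =>
      cases pos with
      | nil => simp [hk] at h
      | cons x ps =>
        simp only [pvGoA, pvPairsA, hk, List.foldl_cons]
        exact ih ps _ (by simp [hk] at h; simpa using h)

theorem pvPairsA_fst (ka : List (String × String)) (ta : List String) :
    ∀ (pos : List String), ta.countP (fun p => (pvKwGet? ka p).isNone) ≤ pos.length →
      (pvPairsA ka ta pos).map Prod.fst = ta := by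
  induction ta with
  | nil => intro pos _; simp [pvPairsA]
  | cons p rest ih =>
    intro pos h
    rw [List.countP_cons] at h
    cases hk : pvKwGet? ka p with
    | some v =>
      simp only [pvPairsA, hk, List.map_cons, List.cons.injEq]
      exact ⟨trivial, ih pos (by simp [hk] at h; omega)⟩
    | none =>
      cases pos with
      | nil => simp [hk] at h
      | cons x ps =>
        simp only [pvPairsA, hk, List.map_cons, List.cons.injEq]
        exact ⟨trivial, ih ps (by simp [hk] at h; simpa using h)⟩

theorem pvPairsA_lastVal_some (ka : List (String × String)) (ta : List String) :
    ∀ (pos : List String), ta.countP (fun p => (pvKwGet? ka p).isNone) ≤ pos.length →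
      ∀ (k v : String), pvKwGet? ka k = some v →
      pvLastVal (pvPairsA ka ta pos) k = if k ∈ ta then some v else none := by
  induction ta with
  | nil => intro pos _ k v _; simp [pvPairsA, pvLastVal]
  | cons p rest ih =>
    intro pos h k v hk
    rw [List.countP_cons] at h
    cases hp : pvKwGet? ka p with
    | some w =>
      simp only [pvPairsA, hp]
      rw [pvLastVal_cons, ih pos (by simp [hp] at h; omega) k v hk]
      by_cases hpk : p = k
      · have hw : w = v := by rw [hpk, hk] at hp; exact (Option.some.inj hp).symm
        by_cases hmem : k ∈ rest <;> simp [hmem, hpk, hw, Option.or]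
      · by_cases hmem : k ∈ rest <;>
          simp [hmem, Option.or, hpk, Ne.symm hpk, beq_iff_eq]
    | none =>
      have hpk : p ≠ k := fun he => by rw [he, hk] at hp; cases hp
      cases pos with
      | nil => simp [hp] at h
      | cons x ps =>
        simp only [pvPairsA, hp]
        rw [pvLastVal_cons, ih ps (by simp [hp] at h; simpa using h) k v hk]
        by_cases hmem : k ∈ rest <;>
          simp [hmem, Option.or, hpk, Ne.symm hpk, beq_iff_eq]

theorem pvPairsA_lastVal_none (ka : List (String × String)) (ta : List String) :
    ∀ (pos : List String), ta.countP (fun p => (pvKwGet? ka p).isNone) ≤ pos.length →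
      ∀ (k : String), pvKwGet? ka k = none →
      pvLastVal (pvPairsA ka ta pos) k
        = pvLastVal ((ta.filter (fun p => (pvKwGet? ka p).isNone)).zip pos) k := by
  induction ta with
  | nil => intro pos _ k _; simp [pvPairsA]
  | cons p rest ih =>
    intro pos h k hk
    rw [List.countP_cons] at h
    cases hp : pvKwGet? ka p with
    | some w =>
      have hpk : p ≠ k := fun he => by rw [he, hk] at hp; cases hp
      simp only [pvPairsA, hp, List.filter_cons, Option.isNone_some, Bool.false_eq_true]
      rw [pvLastVal_cons]
      have : (if (p == k) = true then some w else none) = none := by simp [hpk, beq_iff_eq]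
      rw [this, Option.or_none]
      exact ih pos (by simp [hp] at h; omega) k hk
    | none =>
      cases pos with
      | nil => simp [hp] at h
      | cons x ps =>
        simp only [pvPairsA, hp, List.filter_cons, Option.isNone_none, if_pos, List.zip_cons_cons]
        rw [pvLastVal_cons, pvLastVal_cons]
        rw [ih ps (by simp [hp] at h; simpa using h) k hk]

theorem pvLastVal_map (ta : List String) (f : String → String) (k : String) :
    pvLastVal (ta.map (fun p => (p, f p))) k = if k ∈ ta then some (f k) else none := by
  induction ta with
  | nil => simp [pvLastVal]
  | cons p t ih =>
    rw [List.map_cons, pvLastVal_cons, ih]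
    by_cases hpk : p = k
    · by_cases hmem : k ∈ t <;> simp [hmem, hpk, Option.or]
    · by_cases hmem : k ∈ t <;>
        simp [hmem, Option.or, hpk, Ne.symm hpk, beq_iff_eq]

-- ===== VERDICT (by name: the statement is the Claim_ definition above) =====
theorem resolve_positional_args_py_spec : Claim_equal_resolve_positional_args_py := by
  intro ta pa ka _ hpre
  unfold Pre_resolve_positional_args_py at hpre
  show resolve_positional_args_py ta pa ka = resolve_positional_args_py_alt ta pa ka
  unfold resolve_positional_args_py resolve_positional_args_py_alt
  have hlen : (ta.filter (fun p => (pvKwGet? ka p).isNone)).length ≤ pa.length := by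
    rw [← List.countP_eq_length_filter]; exact hpre
  rw [pvGoA_eq ka ta pa PySem.Dict.empty hpre]
  simp only [Option.getD_some, gt_iff_lt, Nat.not_lt.mpr hlen, reduceIte]
  congr 1
  refine Eq.trans (pvFoldl_ins_eq (pvPairsA ka ta pa)
      (ta.map (fun p => (p, match pvKwGet? ka p with
        | some v => v
        | none => (PySem.Dict.ofList ((ta.filter (fun p => (pvKwGet? ka p).isNone)).zip pa)).getD p "")))
      PySem.Dict.empty PySem.Dict.empty ?_ rfl PySem.Dict.nodup_keys_empty ?_) List.foldl_map
  · rw [pvPairsA_fst ka ta pa hpre, List.map_map]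
    exact (List.map_id ta).symm
  · intro k
    rw [PySem.Dict.get?_empty, Option.or_none, Option.or_none]
    cases hk : pvKwGet? ka k with
    | some v =>
      rw [pvPairsA_lastVal_some ka ta pa hpre k v hk, pvLastVal_map]
      by_cases hmem : k ∈ ta <;> simp [hmem, hk]
    | none =>
      rw [pvPairsA_lastVal_none ka ta pa hpre k hk, pvLastVal_map]
      by_cases hmem : k ∈ ta
      · have hkneed : k ∈ ta.filter (fun p => (pvKwGet? ka p).isNone) := by
          rw [List.mem_filter]; exact ⟨hmem, by simp [hk]⟩
        have hfst : ((ta.filter (fun p => (pvKwGet? ka p).isNone)).zip pa).map Prod.fst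
            = ta.filter (fun p => (pvKwGet? ka p).isNone) := List.map_fst_zip hlen
        have hsome : pvLastVal ((ta.filter (fun p => (pvKwGet? ka p).isNone)).zip pa) k ≠ none := by
          rw [Ne, pvLastVal_eq_none_iff, hfst]
          simp [hkneed]
        cases hlv : pvLastVal ((ta.filter (fun p => (pvKwGet? ka p).isNone)).zip pa) k with
        | none => exact absurd hlv hsome
        | some w =>
          simp [hmem, hk, PySem.Dict.getD_eq_get?_getD, pvGet?_ofList, hlv]
      · have hfst : ((ta.filter (fun p => (pvKwGet? ka p).isNone)).zip pa).map Prod.fst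
            = ta.filter (fun p => (pvKwGet? ka p).isNone) := List.map_fst_zip hlen
        have : pvLastVal ((ta.filter (fun p => (pvKwGet? ka p).isNone)).zip pa) k = none := by
          rw [pvLastVal_eq_none_iff, hfst]
          intro hkin
          exact hmem (List.mem_of_mem_filter hkin)
        rw [this]
        simp [hmem]
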